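-- pv_equiv track=rewrite | github.com/ansys/pystk | scripts/autoapi.py | _wrap_python_code_snippets
-- ===== SOURCE A (Python) =====
-- def _wrap_python_code_snippets(unformatted_docstring: str):
--     formatted_docstring = ""
--
--     in_snippet = False
--     for line in unformatted_docstring.splitlines():
--         if not in_snippet and len(line) - len(line.lstrip()) > 0:  # found indentation
--             in_snippet = True
--             formatted_docstring += ".. code-block:: python\n\n"
--         elif in_snippet and len(line) - len(line.lstrip()) == 0:  # found end of indentation
--             in_snippet = False
--
--         formatted_docstring += line + "\n"
--
--     return formatted_docstring.rstrip()
-- ===== SOURCE B (Python) =====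
-- def _wrap_python_code_snippets(unformatted_docstring: str):
--     # Run-based decomposition: chunk the lines into maximal runs of equal
--     # indentation status; emit a header once before each indented run.
--     lines = unformatted_docstring.splitlines()
--     out = []
--     i = 0
--     while i < len(lines):
--         k = len(lines[i]) > len(lines[i].lstrip())
--         j = i + 1
--         while j < len(lines) and (len(lines[j]) > len(lines[j].lstrip())) == k:
--             j += 1
--         if k:
--             out.append(".. code-block:: python\n\n")
--         out.extend(line + "\n" for line in lines[i:j])
--         i = j
--     return "".join(out).rstrip()
-- ===== Notes on version B (the rewrite author's own statement) =====
-- stated objective: alternative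
-- what changed: Replaces A's per-line in_snippet toggle state machine with a run-based algorithm: an outer loop walks maximal runs of lines with equal indentation status (an inner scan finds each run boundary), emits the code-block header once before each indented run and copies the run's lines wholesale.
import Mathlib
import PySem

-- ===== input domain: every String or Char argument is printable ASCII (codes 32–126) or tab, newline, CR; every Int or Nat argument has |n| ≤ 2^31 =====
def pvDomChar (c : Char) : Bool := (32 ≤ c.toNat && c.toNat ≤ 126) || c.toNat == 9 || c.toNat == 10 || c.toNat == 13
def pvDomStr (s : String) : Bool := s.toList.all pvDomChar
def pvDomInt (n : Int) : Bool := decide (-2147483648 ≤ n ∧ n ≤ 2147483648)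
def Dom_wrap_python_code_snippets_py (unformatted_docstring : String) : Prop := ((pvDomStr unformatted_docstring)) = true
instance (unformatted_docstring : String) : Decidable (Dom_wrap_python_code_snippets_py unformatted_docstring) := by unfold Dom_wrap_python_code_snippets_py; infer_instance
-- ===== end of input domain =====

-- B replaces A's per-line in_snippet state machine by a run-based loop: it walks maximal
-- runs of lines with equal indentation status and emits the header once per indented run
-- (objective: alternative decomposition, same cost).

-- ===== PORT A =====
-- the loop body of A's for-loop: state = (formatted_docstring, in_snippet)
def pvStepA (st : List Char × Bool) (line : List Char) : List Char × Bool :=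
  let st :=
    if !st.2 && decide (0 < line.length - (PySem.Chars.lstrip line).length) then
      (st.1 ++ ".. code-block:: python\n\n".toList, true)
    else if st.2 && decide (line.length - (PySem.Chars.lstrip line).length = 0) then
      (st.1, false)
    else st
  (st.1 ++ line ++ ['\n'], st.2)

def wrap_python_code_snippets_py (unformatted_docstring : String) : String :=
  let r := (PySem.Chars.splitlines unformatted_docstring.toList).foldl pvStepA ([], false)
  String.ofList (PySem.Chars.rstrip r.1)

-- ===== PORT B =====
-- len(line) > len(line.lstrip())
def pvKeyB (line : List Char) : Bool := decide ((PySem.Chars.lstrip line).length < line.length)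

-- Source B's outer while loop over run boundaries (the inner while is the takeWhile/dropWhile
-- scan for j); each iteration appends the optional header and the run's lines to `out`.
def pvRunsB : List (List Char) → List (List Char)
  | [] => []
  | l :: ls =>
      let k := pvKeyB l
      let run := ls.takeWhile (fun x => pvKeyB x == k)
      let rest := ls.dropWhile (fun x => pvKeyB x == k)
      (if k then [".. code-block:: python\n\n".toList] else [])
        ++ (l :: run).map (· ++ ['\n']) ++ pvRunsB rest
termination_by ls => ls.length
decreasing_by
  simpa using Nat.lt_succ_of_le (List.length_dropWhile_le _ ls)

def wrap_python_code_snippets_py_alt (unformatted_docstring : String) : String :=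
  let out := pvRunsB (PySem.Chars.splitlines unformatted_docstring.toList)
  String.ofList (PySem.Chars.rstrip (PySem.Chars.join [] out))

-- ===== PRECONDITION & SPEC =====
def Spec_wrap_python_code_snippets_py (unformatted_docstring : String) (out : String) : Prop := out = wrap_python_code_snippets_py_alt unformatted_docstring
instance (unformatted_docstring : String) (out : String) : Decidable (Spec_wrap_python_code_snippets_py unformatted_docstring out) := by unfold Spec_wrap_python_code_snippets_py; infer_instance

-- ===== CLAIM (what is proved, stated in full; the proofs are below) =====
def Claim_equal_wrap_python_code_snippets_py : Prop := ∀ (unformatted_docstring : String), Dom_wrap_python_code_snippets_py unformatted_docstring → Spec_wrap_python_code_snippets_py unformatted_docstring (wrap_python_code_snippets_py unformatted_docstring)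

-- ===== LEMMAS AND PROOFS =====

-- the characters A's fold appends for the lines `ls` when the previous state is `p`
def pvFlat : List (List Char) → Bool → List Char
  | [], _ => []
  | l :: ls, p =>
      (if pvKeyB l && !p then ".. code-block:: python\n\n".toList else [])
        ++ l ++ ['\n'] ++ pvFlat ls (pvKeyB l)

theorem pvFoldA (ls : List (List Char)) : ∀ (p : Bool) (acc : List Char),
    (ls.foldl pvStepA (acc, p)).1 = acc ++ pvFlat ls p := by
  induction ls with
  | nil => intro p acc; simp [pvFlat]
  | cons l ls ih =>
    intro p acc
    have hk : (l.length - (PySem.Chars.lstrip l).length = 0) ↔ ¬ ((PySem.Chars.lstrip l).length < l.length) := by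
      omega
    by_cases hp : p <;> by_cases hkey : (PySem.Chars.lstrip l).length < l.length <;>
      simp [List.foldl_cons, pvStepA, pvFlat, pvKeyB, hk, hkey, hp, ih]

theorem pvJoinFlatten : ∀ xs : List (List Char), PySem.Chars.join [] xs = xs.flatten := by
  intro xs
  induction xs with
  | nil => simp [PySem.Chars.join_nil]
  | cons a tl ih =>
    cases tl with
    | nil => simp [PySem.Chars.join_singleton]
    | cons b rest => simp [PySem.Chars.join_cons_cons, ih]

-- inside a run, every line has the same key as the previous line, so A emits no header
theorem pvFlat_run (k : Bool) : ∀ (run rest : List (List Char)),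
    (∀ x ∈ run, pvKeyB x = k) →
    pvFlat (run ++ rest) k = (run.map (· ++ ['\n'])).flatten ++ pvFlat rest k := by
  intro run
  induction run with
  | nil => intro rest _; simp
  | cons a run ih =>
    intro rest h
    have ha : pvKeyB a = k := h a (by simp)
    have h' : ∀ x ∈ run, pvKeyB x = k := fun x hx => h x (by simp [hx])
    simp [pvFlat, ha, ih rest h']

-- whenever the previous state does not already cover the head line's key (so A's toggle
-- fires exactly at run starts), A's per-line output equals B's run-based output.
theorem pvFlat_eq_runs : ∀ (n : Nat) (ls : List (List Char)) (p : Bool), ls.length ≤ n →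
    (∀ l, ls.head? = some l → (p && pvKeyB l) = false) →
    pvFlat ls p = (pvRunsB ls).flatten := by
  intro n
  induction n with
  | zero =>
    intro ls p hlen _
    have : ls = [] := List.eq_nil_of_length_eq_zero (Nat.le_zero.mp hlen)
    simp [this, pvFlat, pvRunsB]
  | succ m ih =>
    intro ls p hlen hcond
    cases ls with
    | nil => simp [pvFlat, pvRunsB]
    | cons l ls =>
      have hk : (p && pvKeyB l) = false := hcond l rfl
      have hrun : ∀ x ∈ ls.takeWhile (fun x => pvKeyB x == pvKeyB l), pvKeyB x = pvKeyB l := by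
        intro x hx
        simpa using List.mem_takeWhile_imp hx
      have hsplit : ls.takeWhile (fun x => pvKeyB x == pvKeyB l)
          ++ ls.dropWhile (fun x => pvKeyB x == pvKeyB l) = ls :=
        List.takeWhile_append_dropWhile
      have hrestlen : (ls.dropWhile (fun x => pvKeyB x == pvKeyB l)).length ≤ m := by
        have := List.length_dropWhile_le (fun x => pvKeyB x == pvKeyB l) ls
        simp at hlen; omega
      have hrestcond : ∀ r, (ls.dropWhile (fun x => pvKeyB x == pvKeyB l)).head? = some r →
          (pvKeyB l && pvKeyB r) = false := by
        intro r hr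
        have := List.head?_dropWhile_not (fun x => pvKeyB x == pvKeyB l) ls
        rw [hr] at this
        simp at this
        cases hkl : pvKeyB l <;> simp [hkl] at this ⊢
        exact this
      have hhdr : (pvKeyB l && !p) = pvKeyB l := by
        cases hkl : pvKeyB l <;> cases hp : p <;> simp_all
      calc pvFlat (l :: ls) p
          = (if pvKeyB l && !p then ".. code-block:: python\n\n".toList else [])
              ++ l ++ ['\n'] ++ pvFlat ls (pvKeyB l) := rfl
        _ = (if pvKeyB l then ".. code-block:: python\n\n".toList else [])
              ++ l ++ ['\n'] ++ pvFlat ls (pvKeyB l) := by rw [hhdr]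
        _ = _ := by
              conv_lhs => rw [← hsplit]
              rw [pvFlat_run (pvKeyB l) _ _ hrun,
                ih _ (pvKeyB l) hrestlen hrestcond]
              rw [pvRunsB]
              cases hkl : pvKeyB l <;> simp

-- ===== VERDICT (by name: the statement is the Claim_ definition above) =====
theorem wrap_python_code_snippets_py_spec : Claim_equal_wrap_python_code_snippets_py := by
  intro s _
  unfold Spec_wrap_python_code_snippets_py wrap_python_code_snippets_py wrap_python_code_snippets_py_alt
  have h := pvFlat_eq_runs (PySem.Chars.splitlines s.toList).length
      (PySem.Chars.splitlines s.toList) false (le_refl _) (by intro l _; simp)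
  simp only [pvFoldA, pvJoinFlatten, List.nil_append, h]
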